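-- pv_equiv track=rewrite | github.com/narayan954/My-Python | Competitive_programs/codechef/CCPR2021/GAMCAF07.py | findComputers
-- ===== SOURCE A (Python) =====
-- def findComputers(arr, dep, n):
--     arr.sort()
--     dep.sort()
--
--     # computers_needed indicates
--     # number of computers
--     # needed at a time
--     computers_needed = 1
--     result = 1
--     i = 1
--     j = 0
--
--     # Similar to merge in
--     # merge sort to process
--     # all events in sorted order
--     while i < n and j < n:
--
--         # If next event in sorted
--         # order is arrival,
--         # increment count of
--         # computers needed
--         if arr[i] <= dep[j]:
--             computers_needed += 1
--             i += 1
--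
--         # Else decrement count
--         # of computers needed
--         else:
--             computers_needed -= 1
--             j += 1
--
--         # Update result if needed
--         if computers_needed > result:
--             result = computers_needed
--
--     return result
-- ===== SOURCE B (Python) =====
-- def findComputers(arr, dep, n):
--     # Single sorted event sweep instead of A's two-pointer merge loop.
--     # Arrival at time t -> event 2*t, departure -> 2*t + 1, so at equal
--     # times arrivals sort before departures (matching A's arr[i] <= dep[j] rule).
--     arr.sort()
--     dep.sort()
--     events = [2 * arr[i] for i in range(n)] + [2 * dep[j] + 1 for j in range(n)]
--     events.sort()
--     count = 0
--     best = 1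
--     for e in events:
--         if e % 2 == 0:
--             count += 1
--         else:
--             count -= 1
--         if count > best:
--             best = count
--     return best
-- ===== Notes on version B (the rewrite author's own statement) =====
-- stated objective: alternative
-- what changed: A's two-pointer merge-style while loop over the two sorted lists is replaced by building one combined event list (2*t for an arrival, 2*t+1 for a departure, so arrivals sort before departures at equal times), sorting it once, and sweeping it with a running count and maximum. Both sort arr and dep in place; the equivalence is about the return value.
-- outside the precondition, e.g. on findComputers([1, 2], [5], 2): A returns 2, B raises IndexError
import Mathlib
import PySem

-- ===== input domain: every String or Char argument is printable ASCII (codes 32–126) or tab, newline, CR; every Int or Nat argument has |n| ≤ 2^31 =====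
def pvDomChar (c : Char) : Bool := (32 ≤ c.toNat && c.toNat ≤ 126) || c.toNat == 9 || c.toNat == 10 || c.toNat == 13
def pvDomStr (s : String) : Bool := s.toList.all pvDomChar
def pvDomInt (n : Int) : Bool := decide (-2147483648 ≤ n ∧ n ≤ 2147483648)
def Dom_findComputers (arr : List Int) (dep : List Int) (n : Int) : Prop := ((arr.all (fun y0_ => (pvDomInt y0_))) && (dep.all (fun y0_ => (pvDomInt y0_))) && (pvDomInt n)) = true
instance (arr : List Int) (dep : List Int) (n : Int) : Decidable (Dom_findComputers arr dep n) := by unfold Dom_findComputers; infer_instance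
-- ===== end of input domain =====

-- B replaces A's two-pointer merge loop by one sorted event list (2*t arrival, 2*t+1 departure)
-- swept once with a running count; same cost, different structure (objective: alternative).
-- Both A and B sort arr and dep in place; the equivalence proved here is about the return value.

-- ===== PORT A =====
-- the 'while i < n and j < n' loop of A, step for step
def findComputersLoop (a : List Int) (d : List Int) (n : Int) (i : Int) (j : Int) (cn : Int) (res : Int) : Int :=
  if h : i < n ∧ j < n then
    if PySem.List.pyGetD a i 0 ≤ PySem.List.pyGetD d j 0 then
      findComputersLoop a d n (i + 1) j (cn + 1) (if cn + 1 > res then cn + 1 else res)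
    else
      findComputersLoop a d n i (j + 1) (cn - 1) (if cn - 1 > res then cn - 1 else res)
  else res
termination_by ((n - i).toNat + (n - j).toNat)
decreasing_by all_goals omega

def findComputers (arr : List Int) (dep : List Int) (n : Int) : Int :=
  let a := PySem.List.sorted arr (fun x => x) false
  let d := PySem.List.sorted dep (fun x => x) false
  findComputersLoop a d n 1 0 1 1

-- ===== PORT B =====
-- one sweep step of B's for-loop: +1 on an (even) arrival event, -1 on an (odd) departure event
def pvStep (st : Int × Int) (e : Int) : Int × Int :=
  let c := if PySem.Int.mod e 2 == 0 then st.1 + 1 else st.1 - 1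
  (c, if c > st.2 then c else st.2)

def findComputers_alt (arr : List Int) (dep : List Int) (n : Int) : Int :=
  let a := PySem.List.sorted arr (fun x => x) false
  let d := PySem.List.sorted dep (fun x => x) false
  let events := (PySem.List.pyRange 0 n 1).map (fun i => 2 * PySem.List.pyGetD a i 0)
             ++ (PySem.List.pyRange 0 n 1).map (fun j => 2 * PySem.List.pyGetD d j 0 + 1)
  let es := PySem.List.sorted events (fun x => x) false
  (es.foldl pvStep (0, 1)).2

-- ===== PRECONDITION & SPEC =====
-- Pre_ excludes n larger than a list length: there A indexes past the end of a sorted list and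
-- usually raises IndexError, and any value it does return comes from an accidental early loop exit;
-- B raises IndexError on all such inputs.
def Pre_findComputers (arr : List Int) (dep : List Int) (n : Int) : Prop :=
  n ≤ (arr.length : Int) ∧ n ≤ (dep.length : Int)
instance (arr : List Int) (dep : List Int) (n : Int) : Decidable (Pre_findComputers arr dep n) := by unfold Pre_findComputers; infer_instance

def pvWitness_findComputers : List Int × List Int × Int := ([1, 3, 5], [4, 2, 6], 3)

def Spec_findComputers (arr : List Int) (dep : List Int) (n : Int) (out : Int) : Prop := out = findComputers_alt arr dep n
instance (arr : List Int) (dep : List Int) (n : Int) (out : Int) : Decidable (Spec_findComputers arr dep n out) := by unfold Spec_findComputers; infer_instance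

-- ===== CLAIM (what is proved, stated in full; the proofs are below) =====
def Claim_equal_findComputers : Prop := ∀ (arr : List Int) (dep : List Int) (n : Int), Dom_findComputers arr dep n → Pre_findComputers arr dep n → Spec_findComputers arr dep n (findComputers arr dep n)

-- ===== LEMMAS AND PROOFS =====

-- structural form of A's two-pointer loop, on the unconsumed suffixes of the two lists
def pvLoopS : List Int → List Int → Int → Int → Int
  | [], _, _, res => res
  | _ :: _, [], _, res => res
  | a :: x, b :: y, cn, res =>
      if a ≤ b then pvLoopS x (b :: y) (cn + 1) (if cn + 1 > res then cn + 1 else res)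
      else pvLoopS (a :: x) y (cn - 1) (if cn - 1 > res then cn - 1 else res)
termination_by x y => x.length + y.length

lemma pvLoopS_nil_left (y : List Int) (cn res : Int) : pvLoopS [] y cn res = res := by
  simp [pvLoopS]

lemma pvLoopS_nil_right (x : List Int) (cn res : Int) : pvLoopS x [] cn res = res := by
  cases x <;> simp [pvLoopS]

lemma pvLoopS_cons_cons (a b : Int) (x y : List Int) (cn res : Int) :
    pvLoopS (a :: x) (b :: y) cn res
      = if a ≤ b then pvLoopS x (b :: y) (cn + 1) (if cn + 1 > res then cn + 1 else res)
        else pvLoopS (a :: x) y (cn - 1) (if cn - 1 > res then cn - 1 else res) := by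
  rw [pvLoopS]

-- B's sweep as a function of the event list and the running state
def pvSweep (es : List Int) (c b : Int) : Int := (es.foldl pvStep (c, b)).2

lemma pvSweep_cons_even (t : Int) (es : List Int) (c b : Int) :
    pvSweep ((2 * t) :: es) c b = pvSweep es (c + 1) (if c + 1 > b then c + 1 else b) := by
  simp [pvSweep, pvStep]

lemma pvSweep_cons_odd (t : Int) (es : List Int) (c b : Int) :
    pvSweep ((2 * t + 1) :: es) c b = pvSweep es (c - 1) (if c - 1 > b then c - 1 else b) := by
  simp [pvSweep, pvStep]

-- departures only: the count only decreases, so the maximum is untouched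
lemma pvSweep_dep (y : List Int) : ∀ c b : Int, c ≤ b →
    pvSweep (y.map (fun t => 2 * t + 1)) c b = b := by
  induction y with
  | nil => intro c b _; rfl
  | cons d y ih =>
      intro c b hcb
      rw [List.map_cons, pvSweep_cons_odd, if_neg (by omega)]
      exact ih (c - 1) b (by omega)

-- arrivals only: the count climbs to c + length, which stays below b
lemma pvSweep_arr (x : List Int) : ∀ c b : Int, c + x.length ≤ b →
    pvSweep (x.map (fun t => 2 * t)) c b = b := by
  induction x with
  | nil => intro c b _; rfl
  | cons a x ih =>
      intro c b h
      simp only [List.length_cons] at h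
      rw [List.map_cons, pvSweep_cons_even, if_neg (by push_cast at h ⊢; omega)]
      exact ih (c + 1) b (by push_cast at h ⊢; omega)

-- one pending arrival against departures only
lemma pvSweep_single_arr (e0 : Int) (y : List Int) : ∀ c b : Int, c + 1 ≤ b →
    pvSweep (List.merge [2 * e0] (y.map (fun t => 2 * t + 1)) (fun a b => a ≤ b)) c b = b := by
  induction y with
  | nil =>
      intro c b h
      rw [List.map_nil, List.merge_right, pvSweep_cons_even, if_neg (by omega)]
      rfl
  | cons d y ih =>
      intro c b h
      rw [List.map_cons, List.cons_merge_cons]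
      by_cases hle : (2 * e0 : Int) ≤ 2 * d + 1
      · rw [if_pos (by simpa using hle)]
        rw [pvSweep_cons_even, if_neg (by omega), List.nil_merge]
        have := pvSweep_dep (d :: y) (c + 1) b (by omega)
        simpa using this
      · rw [if_neg (by simpa using hle)]
        rw [pvSweep_cons_odd, if_neg (by omega)]
        exact ih (c - 1) b (by omega)

-- main simulation, no pending arrival: the sweep of the merged events IS A's loop
lemma pvC1 (x : List Int) : ∀ (y : List Int) (cn res : Int),
    cn = (y.length : Int) - x.length → cn ≤ res → 1 ≤ res →
    pvSweep (List.merge (x.map (fun t => 2 * t)) (y.map (fun t => 2 * t + 1)) (fun a b => a ≤ b)) cn res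
      = pvLoopS x y cn res := by
  induction x with
  | nil =>
      intro y cn res hcn hle h1
      rw [List.map_nil, List.nil_merge, pvSweep_dep y cn res hle, pvLoopS_nil_left]
  | cons x0 xt ihx =>
      intro y
      induction y with
      | nil =>
          intro cn res hcn hle h1
          simp only [List.length_nil, List.length_cons] at hcn
          rw [List.map_nil, List.merge_right,
            pvSweep_arr (x0 :: xt) cn res (by push_cast [List.length_cons] at hcn ⊢; omega),
            pvLoopS_nil_right]
      | cons d y' ihy =>
          intro cn res hcn hle h1
          simp only [List.length_cons] at hcn
          simp only [List.map_cons]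
          rw [List.cons_merge_cons]
          by_cases hc : x0 ≤ d
          · rw [if_pos (by simp; omega)]
            rw [pvSweep_cons_even]
            rw [pvLoopS_cons_cons, if_pos hc]
            have := ihx (d :: y') (cn + 1) (if cn + 1 > res then cn + 1 else res)
              (by push_cast [List.length_cons]; push_cast at hcn; omega)
              (by split <;> omega) (by split <;> omega)
            simpa using this
          · rw [if_neg (by simp; omega)]
            rw [pvSweep_cons_odd]
            rw [pvLoopS_cons_cons, if_neg hc]
            have := ihy (cn - 1) (if cn - 1 > res then cn - 1 else res)
              (by push_cast [List.length_cons]; push_cast at hcn; omega)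
              (by split <;> omega) (by split <;> omega)
            simpa using this

-- main simulation with the first arrival still pending (A starts its loop at i = 1, cn = 1)
lemma pvG (x0 : Int) (xt : List Int) (hmin : ∀ z ∈ xt, x0 ≤ z) :
    ∀ (y : List Int) (cn res : Int),
    cn = (y.length : Int) - xt.length → cn ≤ res → 1 ≤ res →
    pvSweep (List.merge ((x0 :: xt).map (fun t => 2 * t)) (y.map (fun t => 2 * t + 1)) (fun a b => a ≤ b)) (cn - 1) res
      = pvLoopS xt y cn res := by
  cases xt with
  | nil =>
      intro y cn res hcn hle h1
      simp only [List.map_cons, List.map_nil]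
      have := pvSweep_single_arr x0 y (cn - 1) res (by omega)
      rw [this, pvLoopS_nil_left]
  | cons x1 xt' =>
      intro y
      induction y with
      | nil =>
          intro cn res hcn hle h1
          simp only [List.length_nil, List.length_cons] at hcn
          rw [List.map_nil, List.merge_right,
            pvSweep_arr (x0 :: x1 :: xt') (cn - 1) res
              (by push_cast [List.length_cons] at hcn ⊢; omega),
            pvLoopS_nil_right]
      | cons d y' ihy =>
          intro cn res hcn hle h1
          simp only [List.length_cons] at hcn
          simp only [List.map_cons]
          rw [List.cons_merge_cons]
          by_cases hc : x0 ≤ d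
          · rw [if_pos (by simp; omega)]
            rw [pvSweep_cons_even, show cn - 1 + 1 = cn from by omega, if_neg (by omega)]
            have := pvC1 (x1 :: xt') (d :: y') cn res
              (by push_cast [List.length_cons]; push_cast at hcn; omega) hle h1
            simpa using this
          · rw [if_neg (by simp; omega)]
            rw [pvSweep_cons_odd, if_neg (by omega)]
            have hx1 : ¬ x1 ≤ d := by have := hmin x1 (by simp); omega
            rw [pvLoopS_cons_cons, if_neg hx1, if_neg (by omega)]
            have := ihy (cn - 1) res (by push_cast [List.length_cons] at hcn ⊢; omega) (by omega) h1
            simpa using this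

-- sorting the concatenation of two sorted event lists is exactly their merge
lemma pvSortedMerge (X Y : List Int) (hx : X.Pairwise (· ≤ ·)) (hy : Y.Pairwise (· ≤ ·)) :
    PySem.List.sorted (X ++ Y) (fun x => x) false = List.merge X Y (fun a b => a ≤ b) := by
  exact PySem.List.sorted_id_eq_of_perm_of_pairwise _ _
    (List.merge_perm_append _) (List.Pairwise.merge hx hy)

-- the '[F(a[i]) for i in range(n)]' comprehension is a map over the first n elements
lemma pvEvents (a : List Int) (n : Int) (F : Int → Int) (h : n ≤ (a.length : Int)) :
    (PySem.List.pyRange 0 n 1).map (fun i => F (PySem.List.pyGetD a i 0)) = (a.take n.toNat).map F := by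
  rw [PySem.List.pyRange_one]
  apply List.ext_getElem
  · simp; omega
  · intro k h1 h2
    simp only [List.getElem_map, List.getElem_range, List.getElem_take]
    simp only [List.length_map, List.length_range] at h1
    rw [show ((0 : Int) + (k : Int)) = ((k : Nat) : Int) from by omega]
    rw [PySem.List.pyGetD_natCast]
    congr 1
    rw [List.getD_eq_getElem?_getD, List.getElem?_eq_getElem (by omega), Option.getD_some]

-- A's indexed loop equals the structural loop on the unconsumed suffixes
lemma pvBridgeA (a d : List Int) (n : Int) (ha : n ≤ (a.length : Int)) (hd : n ≤ (d.length : Int)) :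
    ∀ (i j cn res : Int), 0 ≤ i → 0 ≤ j →
    findComputersLoop a d n i j cn res
      = pvLoopS ((a.take n.toNat).drop i.toNat) ((d.take n.toNat).drop j.toNat) cn res := by
  intro i j cn res hi hj
  induction hm : ((n - i).toNat + (n - j).toNat) using Nat.strong_induction_on
    generalizing i j cn res with
  | _ m ih =>
  subst hm
  rw [findComputersLoop]
  by_cases hin : i < n ∧ j < n
  · rw [dif_pos hin]
    have hlta : (a.take n.toNat).length = n.toNat := by simp; omega
    have hltd : (d.take n.toNat).length = n.toNat := by simp; omega
    have hia : i.toNat < (a.take n.toNat).length := by omega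
    have hjd : j.toNat < (d.take n.toNat).length := by omega
    rw [List.drop_eq_getElem_cons hia, List.drop_eq_getElem_cons hjd]
    have hga : (a.take n.toNat)[i.toNat] = a[i.toNat]'(by omega) := List.getElem_take
    have hgd : (d.take n.toNat)[j.toNat] = d[j.toNat]'(by omega) := List.getElem_take
    have hpa : PySem.List.pyGetD a i 0 = a[i.toNat]'(by omega) :=
      PySem.List.pyGetD_eq_getElem a 0 hi (by omega)
    have hpd : PySem.List.pyGetD d j 0 = d[j.toNat]'(by omega) :=
      PySem.List.pyGetD_eq_getElem d 0 hj (by omega)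
    rw [pvLoopS_cons_cons, hga, hgd, hpa, hpd]
    by_cases hc : a[i.toNat]'(by omega) ≤ d[j.toNat]'(by omega)
    · rw [if_pos hc, if_pos hc]
      have := ih ((n - (i+1)).toNat + (n - j).toNat) (by omega) (i+1) j (cn+1)
        (if cn + 1 > res then cn + 1 else res) (by omega) hj rfl
      rw [this, show (i+1).toNat = i.toNat + 1 from by omega, ← hgd,
        ← List.drop_eq_getElem_cons hjd]
    · rw [if_neg hc, if_neg hc]
      have := ih ((n - i).toNat + (n - (j+1)).toNat) (by omega) i (j+1) (cn-1)
        (if cn - 1 > res then cn - 1 else res) hi (by omega) rfl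
      rw [this, show (j+1).toNat = j.toNat + 1 from by omega, ← hga,
        ← List.drop_eq_getElem_cons hia]
  · rw [dif_neg hin]
    rcases not_and_or.mp hin with hcase | hcase
    · have : (a.take n.toNat).drop i.toNat = [] := by
        apply List.drop_eq_nil_of_le; simp; omega
      rw [this, pvLoopS_nil_left]
    · have : (d.take n.toNat).drop j.toNat = [] := by
        apply List.drop_eq_nil_of_le; simp; omega
      rw [this, pvLoopS_nil_right]

lemma pvEventsArr (a : List Int) (n : Int) (h : n ≤ (a.length : Int)) :
    (PySem.List.pyRange 0 n 1).map (fun i => 2 * PySem.List.pyGetD a i 0)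
      = (a.take n.toNat).map (fun t => 2 * t) :=
  pvEvents a n (fun t => 2 * t) h

lemma pvEventsDep (d : List Int) (n : Int) (h : n ≤ (d.length : Int)) :
    (PySem.List.pyRange 0 n 1).map (fun j => 2 * PySem.List.pyGetD d j 0 + 1)
      = (d.take n.toNat).map (fun t => 2 * t + 1) :=
  pvEvents d n (fun t => 2 * t + 1) h

-- ===== VERDICT (by name: the statement is the Claim_ definition above) =====
theorem findComputers_spec : Claim_equal_findComputers := by
  intro arr dep n _ hpre
  obtain ⟨ha0, hd0⟩ := hpre
  unfold Spec_findComputers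
  simp only [findComputers, findComputers_alt]
  have ha : n ≤ ((PySem.List.sorted arr (fun x => x) false).length : Int) := by
    rw [PySem.List.length_sorted]; exact ha0
  have hd : n ≤ ((PySem.List.sorted dep (fun x => x) false).length : Int) := by
    rw [PySem.List.length_sorted]; exact hd0
  set a := PySem.List.sorted arr (fun x => x) false with hadef
  set d := PySem.List.sorted dep (fun x => x) false with hddef
  by_cases hn : n ≤ 0
  · rw [findComputersLoop, dif_neg (by omega)]
    rw [PySem.List.pyRange_one_eq_nil (by omega)]
    simp [PySem.List.sorted]
  · -- n ≥ 1
    have hn1 : (1 : Int) ≤ n := by omega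
    rw [pvBridgeA a d n ha hd 1 0 1 1 (by omega) (by omega)]
    rw [pvEventsArr a n ha, pvEventsDep d n hd]
    have hpa : (a.take n.toNat).Pairwise (· ≤ ·) :=
      (List.Pairwise.sublist (List.take_sublist _ _) (PySem.List.sorted_pairwise arr (fun x => x)))
    have hpd : (d.take n.toNat).Pairwise (· ≤ ·) :=
      (List.Pairwise.sublist (List.take_sublist _ _) (PySem.List.sorted_pairwise dep (fun x => x)))
    rw [pvSortedMerge _ _
      (hpa.map _ (fun p q (hpq : p ≤ q) => by omega))
      (hpd.map _ (fun p q (hpq : p ≤ q) => by omega))]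
    have hlta : (a.take n.toNat).length = n.toNat := by simp; omega
    have hltd : (d.take n.toNat).length = n.toNat := by simp; omega
    cases hta : a.take n.toNat with
    | nil => rw [hta] at hlta; simp at hlta; omega
    | cons a0 ta' =>
      have hmin : ∀ z ∈ ta', a0 ≤ z := by
        have := hta ▸ hpa
        exact fun z hz => (List.pairwise_cons.mp this).1 z hz
      have hinv : (1 : Int) = ((d.take n.toNat).length : Int) - (ta'.length : Int) := by
        have : ta'.length + 1 = n.toNat := by
          rw [hta] at hlta; simpa using hlta
        rw [hltd]; omega
      have hG := pvG a0 ta' hmin (d.take n.toNat) 1 1 hinv le_rfl le_rfl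
      rw [show (1 : Int) - 1 = 0 from by norm_num] at hG
      show pvLoopS ta' (d.take n.toNat) 1 1
        = pvSweep (List.merge ((a0 :: ta').map (fun t => 2 * t))
            ((d.take n.toNat).map (fun t => 2 * t + 1)) (fun a b => a ≤ b)) 0 1
      exact hG.symm
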